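-- pv_equiv track=rewrite | github.com/Mathew5555/Telegram_Bot_Guru | output/funcs_backend.py | prepare_for_markdown
-- ===== SOURCE A (Python) =====
-- import string
--
-- def prepare_for_markdown(text, spoiler=True):
--     res = ''
--     if spoiler:
--         res += '|| '
--     for i in text:
--         if i in string.punctuation:
--             res += '\\' + i
--         else:
--             res += i
--     if spoiler:
--         return res + ' ||'
--     return res
-- ===== SOURCE B (Python) =====
-- import re
-- import string
--
-- _PUNCT_RE = re.compile('[' + re.escape(string.punctuation) + ']')
--
-- def prepare_for_markdown(text, spoiler=True):
--     body = _PUNCT_RE.sub(lambda m: '\\' + m.group(0), text)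
--     return '|| ' + body + ' ||' if spoiler else body
-- ===== Notes on version B (the rewrite author's own statement) =====
-- stated objective: idiomatic
-- what changed: Replaces the explicit per-character loop with string accumulator by a precompiled regex character class over string.punctuation and one re.sub call (the engine scans to each match and splices in the escaped character), with the spoiler markers added around the substituted body.
import Mathlib
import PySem

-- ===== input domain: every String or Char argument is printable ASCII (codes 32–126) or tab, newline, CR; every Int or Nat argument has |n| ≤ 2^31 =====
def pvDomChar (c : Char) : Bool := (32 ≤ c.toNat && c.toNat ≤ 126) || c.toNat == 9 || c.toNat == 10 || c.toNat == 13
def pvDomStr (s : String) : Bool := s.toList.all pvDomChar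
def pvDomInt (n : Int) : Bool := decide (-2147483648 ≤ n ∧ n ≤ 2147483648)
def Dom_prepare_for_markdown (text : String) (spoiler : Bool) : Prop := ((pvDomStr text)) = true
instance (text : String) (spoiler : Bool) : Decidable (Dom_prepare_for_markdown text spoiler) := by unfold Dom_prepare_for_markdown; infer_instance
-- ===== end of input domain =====

-- B replaces A's per-character loop/accumulator by a single regex substitution
-- (re.sub over a character class of string.punctuation); idiomatic, one library call.


-- string.punctuation
def pvPunct : List Char := "!\"#$%&'()*+,-./:;<=>?@[\\]^_`{|}~".toList

-- ===== PORT A =====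
-- res = ''; (res += '|| ' if spoiler); for i in text: res += '\\'+i if i in punctuation else i; (res += ' ||' if spoiler)
def prepare_for_markdown (text : String) (spoiler : Bool) : String :=
  let res : String := if spoiler then "" ++ "|| " else ""
  let res : String := text.toList.foldl
    (fun r i => if pvPunct.contains i then r ++ ("\\" ++ String.singleton i) else r ++ String.singleton i) res
  if spoiler then res ++ " ||" else res

-- ===== PORT B =====
-- _PUNCT_RE.sub(lambda m: '\\'+m.group(0), text): the engine skips to the next
-- character-class match (the non-matching gap is copied verbatim), emits the
-- replacement, and resumes after the match; exact for this single-char class.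
def pvReSub (l : List Char) : List Char :=
  let gap := l.takeWhile (fun c => !pvPunct.contains c)
  match h : l.dropWhile (fun c => !pvPunct.contains c) with
  | [] => gap
  | c :: rest => gap ++ '\\' :: c :: pvReSub rest
termination_by l.length
decreasing_by
  have := (List.dropWhile_sublist (p := fun c => !pvPunct.contains c) (l := l)).length_le
  rw [h] at this; simp at this; omega

def prepare_for_markdown_alt (text : String) (spoiler : Bool) : String :=
  let body : String := String.ofList (pvReSub text.toList)
  if spoiler then "|| " ++ body ++ " ||" else body

-- ===== PRECONDITION & SPEC =====
def Spec_prepare_for_markdown (text : String) (spoiler : Bool) (out : String) : Prop := out = prepare_for_markdown_alt text spoiler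
instance (text : String) (spoiler : Bool) (out : String) : Decidable (Spec_prepare_for_markdown text spoiler out) := by unfold Spec_prepare_for_markdown; infer_instance

-- ===== CLAIM (what is proved, stated in full; the proofs are below) =====
def Claim_equal_prepare_for_markdown : Prop := ∀ (text : String) (spoiler : Bool), Dom_prepare_for_markdown text spoiler → Spec_prepare_for_markdown text spoiler (prepare_for_markdown text spoiler)

-- ===== LEMMAS AND PROOFS =====
-- proof-only helper: what one character contributes
def pvEsc (c : Char) : List Char := if pvPunct.contains c then ['\\', c] else [c]

theorem flatMap_esc_id (l : List Char) (hl : ∀ c ∈ l, pvPunct.contains c = false) :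
    l.flatMap pvEsc = l := by
  induction l with
  | nil => simp
  | cons c t ih =>
    have hc := hl c (by simp)
    have hc' : c ∉ pvPunct := by simpa using hc
    simp [pvEsc, hc', ih (fun x hx => hl x (by simp [hx]))]

theorem dropWhile_head_punct (l : List Char) (c : Char) (rest : List Char)
    (h : l.dropWhile (fun c => !pvPunct.contains c) = c :: rest) :
    pvPunct.contains c = true := by
  induction l with
  | nil => simp at h
  | cons a t ih =>
    by_cases ha : pvPunct.contains a
    · rw [List.dropWhile_cons_of_neg (by simpa using ha)] at h
      cases h; exact ha
    · rw [List.dropWhile_cons_of_pos (by simpa using ha)] at h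
      exact ih h

-- the regex substitution equals the per-character expansion
theorem pvReSub_eq_flatMap (l : List Char) : pvReSub l = l.flatMap pvEsc := by
  induction l using pvReSub.induct with
  | case1 l h =>
    have hl : l = l.takeWhile (fun c => !pvPunct.contains c) := by
      conv_lhs => rw [← List.takeWhile_append_dropWhile (p := fun c => !pvPunct.contains c) (l := l)]
      rw [h]; simp
    rw [pvReSub]
    split
    case _ h' =>
      rw [← hl]
      exact (flatMap_esc_id l (fun c hc => by
        have := List.mem_takeWhile_imp (hl ▸ hc)
        simpa using this)).symm
    case _ c rest h' => rw [h] at h'; cases h'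
  | case2 l c rest h ih =>
    have hsplit := List.takeWhile_append_dropWhile (p := fun c => !pvPunct.contains c) (l := l)
    rw [pvReSub]
    split
    case _ h' => rw [h] at h'; cases h'
    case _ c' rest' h' =>
    rw [h] at h'
    obtain ⟨rfl, rfl⟩ : c = c' ∧ rest = rest' := by cases h'; exact ⟨rfl, rfl⟩
    rw [ih]
    have hc : pvPunct.contains c = true := dropWhile_head_punct l c rest h
    have hgap : List.flatMap pvEsc (l.takeWhile (fun c => !pvPunct.contains c))
        = l.takeWhile (fun c => !pvPunct.contains c) :=
      flatMap_esc_id _ (fun x hx => by simpa using List.mem_takeWhile_imp hx)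
    have hc' : c ∈ pvPunct := by simpa using hc
    conv_rhs => rw [← hsplit, h]
    rw [List.flatMap_append, hgap]
    simp [pvEsc, hc']

-- A's loop, started from acc, appends exactly the substituted body.
theorem foldl_esc (l : List Char) (acc : String) :
    l.foldl (fun r i => if pvPunct.contains i then r ++ ("\\" ++ String.singleton i) else r ++ String.singleton i) acc
      = acc ++ String.ofList (l.flatMap pvEsc) := by
  induction l generalizing acc with
  | nil => apply String.toList_inj.mp; simp
  | cons c t ih =>
    rw [List.foldl_cons, ih]
    apply String.toList_inj.mp
    by_cases h : c ∈ pvPunct <;> simp [pvEsc, h, String.singleton]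

-- ===== VERDICT (by name: the statement is the Claim_ definition above) =====
theorem prepare_for_markdown_spec : Claim_equal_prepare_for_markdown := by
  intro text spoiler _
  unfold Spec_prepare_for_markdown prepare_for_markdown prepare_for_markdown_alt
  rw [pvReSub_eq_flatMap]
  cases spoiler
  · show text.toList.foldl
        (fun r i => if pvPunct.contains i then r ++ ("\\" ++ String.singleton i) else r ++ String.singleton i) ""
        = String.ofList (text.toList.flatMap pvEsc)
    rw [foldl_esc]
    apply String.toList_inj.mp; simp
  · show (text.toList.foldl
        (fun r i => if pvPunct.contains i then r ++ ("\\" ++ String.singleton i) else r ++ String.singleton i)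
        ("" ++ "|| ")) ++ " ||"
        = "|| " ++ String.ofList (text.toList.flatMap pvEsc) ++ " ||"
    rw [foldl_esc]
    apply String.toList_inj.mp; simp
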